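-- pv_equiv track=rewrite | github.com/ShalomVanunu/SelfPy | Targil7.2.2.py | numbers_letters_count
-- ===== SOURCE A (Python) =====
-- def numbers_letters_count(my_str):
--     count_numbers = 0
--     count_letters = 0
--     result = [0,0]
--     for letter in my_str :
--         if letter.isdigit():
--             count_numbers +=1
--         else:
--             count_letters +=1
--     result[0] = count_numbers
--     result[1] = count_letters
--     return result
-- ===== SOURCE B (Python) =====
-- def numbers_letters_count(my_str):
--     n = len(my_str)
--     if n == 0:
--         return [0, 0]
--     if n == 1:
--         return [1, 0] if my_str.isdigit() else [0, 1]
--     mid = n // 2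
--     left = numbers_letters_count(my_str[:mid])
--     right = numbers_letters_count(my_str[mid:])
--     return [left[0] + right[0], left[1] + right[1]]
-- ===== Notes on version B (the rewrite author's own statement) =====
-- stated objective: alternative
-- what changed: Replaces the single linear scan with two parallel counters by a divide-and-conquer recursion: split the string in half, count each half recursively, add the component-wise results (base cases: empty string and single character).
import Mathlib
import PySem

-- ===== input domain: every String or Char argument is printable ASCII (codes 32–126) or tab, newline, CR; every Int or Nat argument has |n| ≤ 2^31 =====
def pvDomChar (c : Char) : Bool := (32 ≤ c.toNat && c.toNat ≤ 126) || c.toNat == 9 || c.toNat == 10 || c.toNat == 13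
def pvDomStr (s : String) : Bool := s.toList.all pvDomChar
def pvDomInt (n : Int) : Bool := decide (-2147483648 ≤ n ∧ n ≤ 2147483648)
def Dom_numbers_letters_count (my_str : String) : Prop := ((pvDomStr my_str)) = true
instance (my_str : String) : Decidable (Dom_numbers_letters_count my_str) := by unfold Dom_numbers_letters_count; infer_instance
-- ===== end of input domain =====

-- ===== PORT A =====
-- B replaces the single scan with two counters by a divide-and-conquer recursion (alternative decomposition, same results).
def numbers_letters_count (my_str : String) : List Int :=
  let st := my_str.toList.foldl
    (fun (acc : Int × Int) letter =>
      if PySem.Chars.isdigit letter then (acc.1 + 1, acc.2) else (acc.1, acc.2 + 1))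
    (0, 0)
  [st.1, st.2]

-- ===== PORT B =====
-- divide and conquer over the characters; Python's my_str[:mid] / my_str[mid:] with 0 <= mid <= len
-- are exactly take/drop on the code points (exact here). The fuel argument is only a structural
-- totality guard: with fuel >= cs.length the guard case is reached only for cs = [].
def nlcAltCore (fuel : Nat) (cs : List Char) : List Int :=
  match fuel with
  | 0 => [0, 0]
  | fuel + 1 =>
    let n := cs.length
    if n = 0 then [0, 0]
    else if n = 1 then
      -- Python: my_str.isdigit() on the 1-character string
      if PySem.Chars.strIsdigit cs then [1, 0] else [0, 1]
    else
      let mid := n / 2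
      let left := nlcAltCore fuel (cs.take mid)
      let right := nlcAltCore fuel (cs.drop mid)
      [left[0]! + right[0]!, left[1]! + right[1]!]

def numbers_letters_count_alt (my_str : String) : List Int :=
  nlcAltCore my_str.toList.length my_str.toList

-- ===== PRECONDITION & SPEC =====
def Spec_numbers_letters_count (my_str : String) (out : List Int) : Prop := out = numbers_letters_count_alt my_str
instance (my_str : String) (out : List Int) : Decidable (Spec_numbers_letters_count my_str out) := by unfold Spec_numbers_letters_count; infer_instance

-- ===== CLAIM (what is proved, stated in full; the proofs are below) =====
def Claim_equal_numbers_letters_count : Prop := ∀ (my_str : String), Dom_numbers_letters_count my_str → Spec_numbers_letters_count my_str (numbers_letters_count my_str)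

-- ===== LEMMAS AND PROOFS =====
theorem nlc_loop (l : List Char) (a b : Int) :
    l.foldl (fun (acc : Int × Int) letter =>
      if PySem.Chars.isdigit letter then (acc.1 + 1, acc.2) else (acc.1, acc.2 + 1)) (a, b)
    = (a + (l.countP (fun c => PySem.Chars.isdigit c) : Nat),
       b + ((l.length : Int) - (l.countP (fun c => PySem.Chars.isdigit c) : Nat))) := by
  induction l generalizing a b with
  | nil => simp
  | cons c t ih =>
    by_cases h : PySem.Chars.isdigit c = true <;>
      simp [List.foldl_cons, h, ih] <;> omega

theorem nlc_core_eq (fuel : Nat) (cs : List Char) (hf : cs.length ≤ fuel) :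
    nlcAltCore fuel cs = [((cs.countP (fun c => PySem.Chars.isdigit c) : Nat) : Int),
                     (cs.length : Int) - ((cs.countP (fun c => PySem.Chars.isdigit c) : Nat) : Int)] := by
  induction fuel generalizing cs with
  | zero =>
    have : cs = [] := List.length_eq_zero_iff.mp (Nat.le_zero.mp hf)
    subst this; simp [nlcAltCore]
  | succ fuel ih =>
    unfold nlcAltCore
    by_cases h0 : cs.length = 0
    · have : cs = [] := List.length_eq_zero_iff.mp h0
      subst this; simp
    · by_cases h1 : cs.length = 1
      · obtain ⟨c, hc⟩ := List.length_eq_one_iff.mp h1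
        subst hc
        by_cases hd : PySem.Chars.isdigit c = true <;>
          simp [h1, PySem.Chars.strIsdigit, hd]
      · have ht : (cs.take (cs.length / 2)).length ≤ fuel := by
          simp only [List.length_take]; omega
        have hdr : (cs.drop (cs.length / 2)).length ≤ fuel := by
          simp only [List.length_drop]; omega
        rw [if_neg h0, if_neg h1]
        simp only [ih _ ht, ih _ hdr]
        have hcnt : (cs.take (cs.length / 2)).countP (fun c => PySem.Chars.isdigit c)
              + (cs.drop (cs.length / 2)).countP (fun c => PySem.Chars.isdigit c)
            = cs.countP (fun c => PySem.Chars.isdigit c) := by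
          rw [← List.countP_append, List.take_append_drop]
        have hlen : (cs.take (cs.length / 2)).length + (cs.drop (cs.length / 2)).length
            = cs.length := by
          rw [← List.length_append, List.take_append_drop]
        simp only [List.getElem!_cons_zero, List.getElem!_cons_succ, List.cons.injEq, and_true]
        omega

-- ===== VERDICT (by name: the statement is the Claim_ definition above) =====
theorem numbers_letters_count_spec : Claim_equal_numbers_letters_count := by
  intro s _
  unfold Spec_numbers_letters_count numbers_letters_count numbers_letters_count_alt
  rw [nlc_core_eq _ _ (le_refl _)]
  simp [nlc_loop]
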